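-- pv_equiv track=rewrite | github.com/lucadesabato/COVRIN_taskT2.1-_scripts | COVRIN_Results_script.py | find_deletions
-- ===== SOURCE A (Python) =====
-- def find_deletions(seq):
-- 	del_long={}
-- 	k=0
-- 	lun=0
-- 	for n in seq:
-- 		if n == "-":
-- 			lun+=1
-- 			k+=1
-- 		else:
-- 			if lun>0:
-- 				del_long[k-lun+1]=lun
-- 				k+=1
-- 				lun=0
-- 			else:
-- 				lun=0
-- 				k+=1
-- 	if lun>0:
-- 			del_long[k-lun+1]=lun
-- 	return del_long
-- ===== SOURCE B (Python) =====
-- def find_deletions(seq):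
--     del_long = {}
--     chars = list(seq)
--     n = len(chars)
--     i = 0
--     while i < n:
--         j = i + 1
--         while j < n and chars[j] == chars[i]:
--             j += 1
--         if chars[i] == '-':
--             del_long[i + 1] = j - i
--         i = j
--     return del_long
-- ===== Notes on version B (the rewrite author's own statement) =====
-- stated objective: alternative
-- what changed: B scans the sequence as maximal runs of equal characters with a two-pointer loop that jumps from run start to run end and records a dash run as (start+1, length) in one step, instead of A's per-character walk updating the counters k and lun and flushing a trailing run after the loop.
import Mathlib
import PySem

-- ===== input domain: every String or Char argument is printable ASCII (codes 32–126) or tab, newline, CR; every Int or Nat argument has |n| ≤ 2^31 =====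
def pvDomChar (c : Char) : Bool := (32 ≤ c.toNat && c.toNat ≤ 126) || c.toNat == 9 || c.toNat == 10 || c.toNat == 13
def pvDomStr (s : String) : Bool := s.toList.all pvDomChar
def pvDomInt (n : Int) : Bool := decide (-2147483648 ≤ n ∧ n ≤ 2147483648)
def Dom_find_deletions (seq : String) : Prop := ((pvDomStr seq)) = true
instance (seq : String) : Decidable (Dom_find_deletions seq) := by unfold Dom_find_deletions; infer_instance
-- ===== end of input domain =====

-- B rewrites A's per-character counter walk as a two-pointer scan over maximal runs; alternative, not faster.

-- ===== PORT A =====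
-- loop body of A: state (del_long, k, lun)
def fdStep (s : PySem.Dict Int Int × Int × Int) (n : Char) : PySem.Dict Int Int × Int × Int :=
  let (d, k, lun) := s
  if n = '-' then (d, k + 1, lun + 1)
  else if lun > 0 then (d.insert (k - lun + 1) lun, k + 1, 0)
  else (d, k + 1, 0)

-- A's trailing flush after the loop, then return the dict (as its items list)
def fdFin (s : PySem.Dict Int Int × Int × Int) : List (Int × Int) :=
  let (d, k, lun) := s
  if lun > 0 then (d.insert (k - lun + 1) lun).items else d.items

def find_deletions (seq : String) : List (Int × Int) :=
  fdFin (seq.toList.foldl fdStep (PySem.Dict.empty, 0, 0))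

-- ===== PORT B =====
-- B's outer while loop: each iteration consumes one maximal run (the inner
-- while-loop scan j is the takeWhile/dropWhile split) and jumps past it.
def fdGo : List Char → Int → List (Int × Int)
  | [], _ => []
  | c :: l, pos =>
    let m : Int := 1 + (l.takeWhile (· = c)).length
    let rest := l.dropWhile (· = c)
    if c = '-' then (pos + 1, m) :: fdGo rest (pos + m)
    else fdGo rest (pos + m)
termination_by cs _ => cs.length
decreasing_by
  all_goals
    simp only [List.length_cons]
    exact Nat.lt_succ_of_le (List.length_dropWhile_le _ _)

def find_deletions_alt (seq : String) : List (Int × Int) :=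
  fdGo seq.toList 0

-- ===== PRECONDITION & SPEC =====
def Spec_find_deletions (seq : String) (out : List (Int × Int)) : Prop := out = find_deletions_alt seq
instance (seq : String) (out : List (Int × Int)) : Decidable (Spec_find_deletions seq out) := by unfold Spec_find_deletions; infer_instance

-- ===== CLAIM (what is proved, stated in full; the proofs are below) =====
def Claim_equal_find_deletions : Prop := ∀ (seq : String), Dom_find_deletions seq → Spec_find_deletions seq (find_deletions seq)

-- ===== LEMMAS AND PROOFS =====

-- folding A's step over a block of dashes just bumps both counters
lemma fdStep_dashes (l : List Char) (hl : ∀ c ∈ l, c = '-') (d : PySem.Dict Int Int)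
    (k lun : Int) :
    List.foldl fdStep (d, k, lun) l = (d, k + l.length, lun + l.length) := by
  induction l generalizing k lun with
  | nil => simp
  | cons c t ih =>
    rw [List.foldl_cons,
      show fdStep (d, k, lun) c = (d, k + 1, lun + 1) by
        simp [fdStep, hl c (by simp)],
      ih (fun x hx => hl x (by simp [hx]))]
    simp only [List.length_cons, Prod.mk.injEq, true_and]
    push_cast
    constructor <;> ring

-- inserting a key strictly above every existing key appends
lemma items_insert_fresh (d : PySem.Dict Int Int) (pos v : Int)
    (hb : ∀ p ∈ d.items, p.1 ≤ pos) :
    (d.insert (pos + 1) v).items = d.items ++ [(pos + 1, v)] := by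
  apply PySem.Dict.items_insert_of_not_contains
  rw [PySem.Dict.contains_eq_decide_mem_keys]
  simp only [decide_eq_false_iff_not, PySem.Dict.keys, List.mem_map]
  rintro ⟨p, hp, hp1⟩
  have := hb p hp
  omega

-- the head of a dropWhile residue falsifies the predicate
lemma dropWhile_head_false {p : Char → Bool} {l r : List Char} {c : Char}
    (h : l.dropWhile p = c :: r) : p c = false := by
  induction l with
  | nil => simp at h
  | cons a t ih =>
    by_cases hp : p a
    · rw [List.dropWhile_cons_of_pos hp] at h
      exact ih h
    · rw [List.dropWhile_cons_of_neg hp] at h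
      cases h
      simpa using hp

-- consuming one non-dash character only shifts B's offset
lemma fdGo_shift (c : Char) (l : List Char) (pos : Int) (hc : c ≠ '-') :
    fdGo (c :: l) pos = fdGo l (pos + 1) := by
  cases l with
  | nil => simp [fdGo, hc]
  | cons c' l' =>
    by_cases h : c' = c
    · subst h
      rw [fdGo, fdGo, if_neg hc, if_neg hc]
      rw [List.takeWhile_cons_of_pos (by simp), List.dropWhile_cons_of_pos (by simp)]
      simp only [List.length_cons]
      congr 1
      push_cast
      ring
    · rw [fdGo, if_neg hc]
      rw [List.takeWhile_cons_of_neg (by simpa using h),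
        List.dropWhile_cons_of_neg (by simpa using h)]
      norm_num

-- the main invariant: running A's loop (with lun = 0) and flushing equals the
-- already-recorded items followed by B's run scan from the same offset
lemma fd_main : ∀ (n : Nat) (cs : List Char) (d : PySem.Dict Int Int) (pos : Int),
    cs.length ≤ n → (∀ p ∈ d.items, p.1 ≤ pos) →
    fdFin (List.foldl fdStep (d, pos, 0) cs) = d.items ++ fdGo cs pos := by
  intro n
  induction n with
  | zero =>
    intro cs d pos hlen _
    have : cs = [] := List.eq_nil_of_length_eq_zero (Nat.le_zero.mp hlen)
    subst this
    simp [fdFin, fdGo]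
  | succ n ih =>
    intro cs d pos hlen hb
    cases cs with
    | nil => simp [fdFin, fdGo]
    | cons c l =>
      have hlen' : l.length ≤ n := by simpa using Nat.lt_succ_iff.mp (by simpa using hlen)
      by_cases hc : c = '-'
      · subst hc
        set t := l.takeWhile (· = '-') with ht
        set r := l.dropWhile (· = '-') with hr
        have htall : ∀ x ∈ t, x = '-' := by
          intro x hx
          simpa using List.mem_takeWhile_imp hx
        have hfold : List.foldl fdStep (d, pos, 0) ('-' :: l)
            = List.foldl fdStep (d, pos + 1 + t.length, 1 + t.length) r := by
          conv_lhs => rw [show ('-' :: l) = ('-' :: t) ++ r by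
            rw [List.cons_append, ht, hr, List.takeWhile_append_dropWhile]]
          rw [List.foldl_append, List.foldl_cons,
            show fdStep (d, pos, 0) '-' = (d, pos + 1, 1) by simp [fdStep],
            fdStep_dashes t htall]
        have hgo : fdGo ('-' :: l) pos
            = (pos + 1, (1 + t.length : Int)) :: fdGo r (pos + 1 + t.length) := by
          rw [fdGo, if_pos rfl, ← ht, ← hr]
          congr 2
          ring
        rw [hfold, hgo]
        have hpos1 : (0 : Int) < 1 + (t.length : Int) := by positivity
        have hkey : pos + 1 + (t.length : Int) - (1 + t.length) + 1 = pos + 1 := by ring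
        cases hrc : r with
        | nil =>
          rw [List.foldl_nil]
          simp only [fdFin, if_pos hpos1, hkey, fdGo]
          rw [items_insert_fresh d pos _ hb]
        | cons c' r' =>
          have hc' : c' ≠ '-' := by
            have := dropWhile_head_false (hr ▸ hrc)
            simpa using this
          have hstep : fdStep (d, pos + 1 + t.length, 1 + t.length) c'
              = (d.insert (pos + 1) (1 + t.length), pos + 1 + t.length + 1, 0) := by
            simp only [fdStep, if_neg hc', if_pos hpos1, hkey]
          rw [List.foldl_cons, hstep]
          have hb' : ∀ p ∈ (d.insert (pos + 1) ((1 : Int) + t.length)).items,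
              p.1 ≤ pos + 1 + (t.length : Int) + 1 := by
            intro p hp
            rw [items_insert_fresh d pos _ hb] at hp
            rcases List.mem_append.mp hp with h1 | h1
            · have := hb p h1; omega
            · have hp1 : p.1 = pos + 1 := by
                rw [List.mem_singleton] at h1
                rw [h1]
              omega
          have hr'len : r'.length ≤ n := by
            have h1 : r.length ≤ l.length := hr ▸ List.length_dropWhile_le _ _
            rw [hrc] at h1
            simp at h1
            omega
          rw [ih r' _ _ hr'len hb', items_insert_fresh d pos _ hb,
            fdGo_shift c' r' (pos + 1 + t.length) hc']
          simp
      · rw [List.foldl_cons,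
          show fdStep (d, pos, 0) c = (d, pos + 1, 0) by simp [fdStep, hc],
          ih l d (pos + 1) hlen' (fun p hp => by have := hb p hp; omega),
          fdGo_shift c l pos hc]

-- ===== VERDICT (by name: the statement is the Claim_ definition above) =====
theorem find_deletions_spec : Claim_equal_find_deletions := by
  intro seq _
  unfold Spec_find_deletions find_deletions find_deletions_alt
  have := fd_main seq.toList.length seq.toList PySem.Dict.empty 0 le_rfl
    (by intro p hp; simp [PySem.Dict.empty] at hp)
  simpa using this
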